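-- pv_equiv track=rewrite | github.com/EricWebsmith/leetcode_py | archive/lc_6226_destroy_sequential_targets.py | destroyTargets
-- ===== SOURCE A (Python) =====
-- from typing import List
--
-- def destroyTargets(nums: List[int], space: int) -> int:
--     n = len(nums)
--     nums.sort()
--     d: dict = dict()
--     max_destroy = 0
--     ans = 0
--     for i in range(n-1, -1, -1):
--         key = nums[i] % space
--         if key in d:
--             d[key] += 1
--         else:
--             d[key] = 1
--         if d[key] >= max_destroy:
--             max_destroy = d[key]
--             ans = nums[i]
--     return ans
-- ===== SOURCE B (Python) =====
-- from typing import List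
--
-- def destroyTargets(nums: List[int], space: int) -> int:
--     # Count each residue group in a dict, then pick the biggest group's
--     # count and the smallest element of any group of that size.
--     counts: dict = {}
--     for x in nums:
--         k = x % space
--         counts[k] = counts.get(k, 0) + 1
--     if not nums:
--         return 0
--     m = max(counts.values())
--     return min(x for x in nums if counts[x % space] == m)
-- ===== Notes on version B (the rewrite author's own statement) =====
-- stated objective: alternative
-- what changed: Replaces A's sort + descending index scan with a running maximum by one counting pass over a dict followed by max of the group counts and min over the elements of a maximum-count group (O(n) vs O(n log n) asymptotically, though not measurably faster in CPython); A also sorts nums in place, B does not mutate it.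
import Mathlib
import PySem

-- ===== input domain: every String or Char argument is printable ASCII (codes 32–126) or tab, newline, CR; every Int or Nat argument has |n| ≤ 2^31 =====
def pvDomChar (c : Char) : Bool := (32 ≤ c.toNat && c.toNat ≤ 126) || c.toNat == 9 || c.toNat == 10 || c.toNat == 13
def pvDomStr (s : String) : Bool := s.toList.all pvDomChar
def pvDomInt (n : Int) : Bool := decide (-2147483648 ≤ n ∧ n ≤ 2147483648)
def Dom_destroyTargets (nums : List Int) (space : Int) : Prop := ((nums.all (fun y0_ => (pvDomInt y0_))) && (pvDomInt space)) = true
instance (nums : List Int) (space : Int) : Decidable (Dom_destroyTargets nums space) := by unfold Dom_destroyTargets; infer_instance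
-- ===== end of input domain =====

-- B replaces A's sort-then-descending-scan with one counting pass over a dict plus max/min selection; A also sorts nums in place — the equivalence proved is about the return value only.


-- ===== PORT A =====
def destroyTargets (nums : List Int) (space : Int) : Int :=
  let n : Int := (nums.length : Int)
  let sortedNums := PySem.List.sorted nums (fun x => x) false
  let st := (PySem.List.pyRange (n - 1) (-1) (-1)).foldl
    (fun (st : PySem.Dict Int Int × Int × Int) i =>
      let d := st.1
      let maxDestroy := st.2.1
      let ans := st.2.2
      let key := PySem.Int.mod (PySem.List.pyGetD sortedNums i 0) space
      let d' := if d.contains key then d.modify key 0 (· + 1) else d.insert key 1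
      if d'.getD key 0 ≥ maxDestroy then (d', d'.getD key 0, PySem.List.pyGetD sortedNums i 0)
      else (d', maxDestroy, ans))
    (PySem.Dict.empty, 0, 0)
  st.2.2

-- ===== PORT B =====
def destroyTargets_alt (nums : List Int) (space : Int) : Int :=
  let counts := nums.foldl (fun (d : PySem.Dict Int Int) x =>
      let k := PySem.Int.mod x space
      d.insert k (d.getD k 0 + 1)) PySem.Dict.empty
  if nums = [] then 0
  else
    match PySem.List.max? counts.values (fun v => v) with
    | none => 0
    | some m =>
      match PySem.List.min? (nums.filter (fun x => counts.getD (PySem.Int.mod x space) 0 == m)) (fun x => x) with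
      | none => 0
      | some a => a

-- ===== PRECONDITION & SPEC =====
-- Pre_ excludes only space = 0 with nonempty nums, where A raises ZeroDivisionError (on empty nums the loop body never runs and A returns 0).
def Pre_destroyTargets (nums : List Int) (space : Int) : Prop := space ≠ 0 ∨ nums = []
instance (nums : List Int) (space : Int) : Decidable (Pre_destroyTargets nums space) := by unfold Pre_destroyTargets; infer_instance
def pvWitness_destroyTargets : List Int × Int := ([3, 7, 8, 1, 1, 5], 2)
def Spec_destroyTargets (nums : List Int) (space : Int) (out : Int) : Prop := out = destroyTargets_alt nums space
instance (nums : List Int) (space : Int) (out : Int) : Decidable (Spec_destroyTargets nums space out) := by unfold Spec_destroyTargets; infer_instance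

-- ===== CLAIM (what is proved, stated in full; the proofs are below) =====
def Claim_equal_destroyTargets : Prop := ∀ (nums : List Int) (space : Int), Dom_destroyTargets nums space → Pre_destroyTargets nums space → Spec_destroyTargets nums space (destroyTargets nums space)

-- ===== LEMMAS AND PROOFS =====

def pvCnt (space : Int) (l : List Int) (k : Int) : Int :=
  ((l.map (fun y => PySem.Int.mod y space)).count k : Int)

theorem pvCnt_append_singleton (space : Int) (p : List Int) (x k : Int) :
    pvCnt space (p ++ [x]) k = pvCnt space p k + (if PySem.Int.mod x space = k then 1 else 0) := by
  by_cases h : PySem.Int.mod x space = k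
  · simp [pvCnt, List.count_append, h]
  · simp [pvCnt, List.count_append, h]

theorem pvCnt_nonneg (space : Int) (p : List Int) (k : Int) : 0 ≤ pvCnt space p k := by
  simp [pvCnt]

theorem pvCnt_perm (space : Int) {p q : List Int} (h : p.Perm q) (k : Int) :
    pvCnt space p k = pvCnt space q k := by
  simp [pvCnt, (h.map (fun y => PySem.Int.mod y space)).count_eq]

theorem pvCountsEq (nums : List Int) (space : Int) :
    nums.foldl (fun (d : PySem.Dict Int Int) x =>
      let k := PySem.Int.mod x space
      d.insert k (d.getD k 0 + 1)) PySem.Dict.empty =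
    PySem.Dict.counter (nums.map (fun y => PySem.Int.mod y space)) := by
  rw [← PySem.Dict.foldl_insert_getD_add_one_eq_counter, List.foldl_map]

def pvStepA (space : Int) (st : PySem.Dict Int Int × Int × Int) (x : Int) :
    PySem.Dict Int Int × Int × Int :=
  let d := st.1
  let maxDestroy := st.2.1
  let ans := st.2.2
  let key := PySem.Int.mod x space
  let d' := if d.contains key then d.modify key 0 (· + 1) else d.insert key 1
  if d'.getD key 0 ≥ maxDestroy then (d', d'.getD key 0, x)
  else (d', maxDestroy, ans)

theorem destroyTargets_eq_fold (nums : List Int) (space : Int) :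
    destroyTargets nums space =
      ((PySem.List.sorted nums (fun x => x) false).reverse.foldl (pvStepA space)
        (PySem.Dict.empty, 0, 0)).2.2 := by
  have base : destroyTargets nums space =
      (((PySem.List.pyRange ((nums.length : Int) - 1) (-1) (-1)).map
          (fun i => PySem.List.pyGetD (PySem.List.sorted nums (fun x => x) false) i 0)).foldl
        (pvStepA space) (PySem.Dict.empty, 0, 0)).2.2 := by
    rw [List.foldl_map]; rfl
  rw [base, PySem.List.pyRange_neg_one_eq_reverse, List.map_reverse]
  have hr : (-1 : Int) + 1 = 0 := by norm_num
  rw [hr]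
  have hlen : (nums.length : Int) - 1 + 1 = ((PySem.List.sorted nums (fun x => x) false).length : Int) := by
    rw [PySem.List.length_sorted]; ring
  rw [hlen, PySem.List.map_pyGetD_pyRange_zero']

theorem pvStep_getD (d : PySem.Dict Int Int) (key k : Int) :
    (if d.contains key then d.modify key 0 (· + 1) else d.insert key 1).getD k 0 =
      if k = key then d.getD key 0 + 1 else d.getD k 0 := by
  by_cases hc : d.contains key
  · simp [hc, PySem.Dict.getD_modify]
  · simp only [hc, if_false, Bool.false_eq_true]
    rw [PySem.Dict.getD_insert]
    have h0 : d.getD key 0 = 0 := PySem.Dict.getD_of_not_contains d 0 (by simpa using hc)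
    split_ifs with h <;> simp [h0]

theorem pvInvA (space : Int) (rest : List Int) : ∀ (p : List Int)
    (d : PySem.Dict Int Int) (maxd ans : Int),
    (∀ x ∈ rest, ∀ y ∈ p, x ≤ y) →
    rest.Pairwise (fun a b => b ≤ a) →
    (∀ k, d.getD k 0 = pvCnt space p k) →
    (p = [] → maxd = 0 ∧ ans = 0) →
    (∀ y ∈ p, pvCnt space p (PySem.Int.mod y space) ≤ maxd) →
    (p ≠ [] → ans ∈ p ∧ pvCnt space p (PySem.Int.mod ans space) = maxd ∧
        ∀ y ∈ p, pvCnt space p (PySem.Int.mod y space) = maxd → ans ≤ y) →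
    (∀ k, (rest.foldl (pvStepA space) (d, maxd, ans)).1.getD k 0 = pvCnt space (p ++ rest) k) ∧
    (p ++ rest = [] → (rest.foldl (pvStepA space) (d, maxd, ans)).2.1 = 0 ∧
      (rest.foldl (pvStepA space) (d, maxd, ans)).2.2 = 0) ∧
    (∀ y ∈ p ++ rest, pvCnt space (p ++ rest) (PySem.Int.mod y space) ≤
      (rest.foldl (pvStepA space) (d, maxd, ans)).2.1) ∧
    (p ++ rest ≠ [] → (rest.foldl (pvStepA space) (d, maxd, ans)).2.2 ∈ p ++ rest ∧
      pvCnt space (p ++ rest)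
        (PySem.Int.mod (rest.foldl (pvStepA space) (d, maxd, ans)).2.2 space) =
        (rest.foldl (pvStepA space) (d, maxd, ans)).2.1 ∧
      ∀ y ∈ p ++ rest, pvCnt space (p ++ rest) (PySem.Int.mod y space) =
        (rest.foldl (pvStepA space) (d, maxd, ans)).2.1 →
        (rest.foldl (pvStepA space) (d, maxd, ans)).2.2 ≤ y) := by
  induction rest with
  | nil =>
    intro p d maxd ans _ _ hd h0 hub hans
    simpa using ⟨hd, h0, hub, hans⟩
  | cons x rest ih =>
    intro p d maxd ans hle hsor hd h0 hub hans
    have hxle : ∀ y ∈ p, x ≤ y := hle x (by simp)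
    have hxrest : ∀ z ∈ rest, z ≤ x := by
      intro z hz; exact (List.pairwise_cons.mp hsor).1 z hz
    -- the new dict after processing x
    set key := PySem.Int.mod x space with hkey
    have hd' : ∀ k,
        (if d.contains key then d.modify key 0 (· + 1) else d.insert key 1).getD k 0 =
          pvCnt space (p ++ [x]) k := by
      intro k
      rw [pvStep_getD, pvCnt_append_singleton]
      by_cases h : k = key
      · simp [h, hd, hkey]
      · rw [if_neg h, if_neg (show ¬PySem.Int.mod x space = k from fun hh => h hh.symm)]
        simp [hd]
    have hcnt' : ∀ k, pvCnt space (p ++ [x]) k =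
        pvCnt space p k + (if key = k then 1 else 0) := fun k => pvCnt_append_singleton ..
    have hassoc : (p ++ [x]) ++ rest = p ++ x :: rest := by simp
    have hle' : ∀ z ∈ rest, ∀ y ∈ p ++ [x], z ≤ y := by
      intro z hz y hy
      rcases List.mem_append.mp hy with hy | hy
      · exact le_trans (hxrest z hz) (hxle y hy)
      · simp at hy; subst hy; exact hxrest z hz
    have hsor' : rest.Pairwise (fun a b => b ≤ a) := (List.pairwise_cons.mp hsor).2
    have hstep : (x :: rest).foldl (pvStepA space) (d, maxd, ans) =
        rest.foldl (pvStepA space) (pvStepA space (d, maxd, ans) x) := rfl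
    rw [hstep]
    have hgd : (if d.contains key then d.modify key 0 (· + 1) else d.insert key 1).getD key 0
        = pvCnt space p key + 1 := by rw [pvStep_getD]; simp [hd]
    by_cases hge : pvCnt space p key + 1 ≥ maxd
    · -- update branch
      have hsv : pvStepA space (d, maxd, ans) x =
          (if d.contains key then d.modify key 0 (· + 1) else d.insert key 1,
            pvCnt space p key + 1, x) := by
        simp only [pvStepA, hkey]
        rw [hgd, if_pos hge]
      rw [hsv]
      have := ih (p ++ [x])
        (if d.contains key then d.modify key 0 (· + 1) else d.insert key 1)
        (pvCnt space p key + 1) x hle' hsor' hd' (by simp)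
        (by
          intro y hy
          rw [hcnt']
          by_cases h : key = PySem.Int.mod y space
          · rw [← h]; simp
          · simp only [h, if_false]
            rcases List.mem_append.mp hy with hy | hy
            · have := hub y hy; omega
            · simp at hy; subst hy; exact absurd rfl h)
        (by
          intro _
          refine ⟨by simp, ?_, ?_⟩
          · rw [hcnt']; simp [hkey]
          · intro y hy _
            rcases List.mem_append.mp hy with hy | hy
            · exact hxle y hy
            · simp at hy; omega)
      rw [hassoc] at this
      exact this
    · -- keep branch
      rw [ge_iff_le, not_le] at hge
      have hsv : pvStepA space (d, maxd, ans) x =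
          (if d.contains key then d.modify key 0 (· + 1) else d.insert key 1, maxd, ans) := by
        simp only [pvStepA, hkey]
        rw [hgd, if_neg (by omega)]
      rw [hsv]
      have hpne : p ≠ [] := by
        intro hp
        rcases h0 hp with ⟨hm, _⟩
        have := pvCnt_nonneg space p key
        omega
      obtain ⟨hansmem, hanscnt, hansmin⟩ := hans hpne
      have hkeyne : PySem.Int.mod ans space ≠ key := by
        intro h
        rw [h] at hanscnt
        omega
      have := ih (p ++ [x])
        (if d.contains key then d.modify key 0 (· + 1) else d.insert key 1)
        maxd ans hle' hsor' hd' (by simp)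
        (by
          intro y hy
          rw [hcnt']
          by_cases h : key = PySem.Int.mod y space
          · rw [← h]; simp; omega
          · simp only [h, if_false]
            rcases List.mem_append.mp hy with hy | hy
            · have := hub y hy; omega
            · simp at hy; subst hy; exact absurd rfl h)
        (by
          intro _
          refine ⟨by simp [hansmem], ?_, ?_⟩
          · rw [hcnt', if_neg (show ¬key = PySem.Int.mod ans space from fun hh => hkeyne hh.symm)]
            simp [hanscnt]
          · intro y hy hcy
            rw [hcnt'] at hcy
            by_cases h : key = PySem.Int.mod y space
            · rw [← h] at hcy; simp at hcy; omega
            · simp only [h, if_false, add_zero] at hcy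
              rcases List.mem_append.mp hy with hy | hy
              · exact hansmin y hy hcy
              · simp at hy; subst hy; exact absurd rfl h)
      rw [hassoc] at this
      exact this

theorem alt_spec (nums : List Int) (space : Int) (hnil : nums ≠ []) :
    destroyTargets_alt nums space ∈ nums ∧
    (∀ y ∈ nums, pvCnt space nums (PySem.Int.mod y space) ≤
      pvCnt space nums (PySem.Int.mod (destroyTargets_alt nums space) space)) ∧
    (∀ y ∈ nums, pvCnt space nums (PySem.Int.mod y space) =
      pvCnt space nums (PySem.Int.mod (destroyTargets_alt nums space) space) →
      destroyTargets_alt nums space ≤ y) := by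
  have hB : destroyTargets_alt nums space =
      (match PySem.List.max? (PySem.Dict.counter (nums.map (fun y => PySem.Int.mod y space))).values (fun v => v) with
      | none => 0
      | some m =>
        match PySem.List.min? (nums.filter (fun x =>
            (PySem.Dict.counter (nums.map (fun y => PySem.Int.mod y space))).getD (PySem.Int.mod x space) 0 == m)) (fun x => x) with
        | none => 0
        | some a => a) := by
    simp only [destroyTargets_alt, pvCountsEq, hnil, if_false]
  set ks := nums.map (fun y => PySem.Int.mod y space) with hks
  have hvals : (PySem.Dict.counter ks).values =
      (PySem.Set.ofList ks).map (fun k => ((List.count k ks : Nat) : Int)) := by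
    show ((PySem.Dict.counter ks).items).map (·.2) = _
    rw [PySem.Dict.items_counter, List.map_map]
    rfl
  obtain ⟨x0, hx0⟩ := List.exists_mem_of_ne_nil nums hnil
  have hkmem : PySem.Int.mod x0 space ∈ PySem.Set.ofList ks := by
    rw [PySem.Set.mem_ofList]
    exact List.mem_map.mpr ⟨x0, hx0, rfl⟩
  have hvne : (PySem.Dict.counter ks).values ≠ [] := by
    rw [hvals]
    intro h
    rw [List.map_eq_nil_iff] at h
    rw [h] at hkmem
    simp at hkmem
  rcases hmax : PySem.List.max? (PySem.Dict.counter ks).values (fun v => v) with _ | m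
  · exact absurd (PySem.List.max?_eq_none_iff _ _ |>.mp hmax) hvne
  have hmmem := PySem.List.max?_mem hmax
  have hmmax := PySem.List.max?_isMax hmax
  rw [hvals] at hmmem
  obtain ⟨k0, hk0set, hk0⟩ := List.mem_map.mp hmmem
  obtain ⟨y0, hy0, hy0k⟩ := List.mem_map.mp ((PySem.Set.mem_ofList _ _).mp hk0set)
  -- every group count is ≤ m, as an inequality about pvCnt
  have hub : ∀ y ∈ nums, pvCnt space nums (PySem.Int.mod y space) ≤ m := by
    intro y hy
    have hmemv : ((List.count (PySem.Int.mod y space) ks : Nat) : Int) ∈ (PySem.Dict.counter ks).values := by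
      rw [hvals]
      exact List.mem_map.mpr ⟨PySem.Int.mod y space,
        (PySem.Set.mem_ofList _ _).mpr (List.mem_map.mpr ⟨y, hy, rfl⟩), rfl⟩
    simpa [pvCnt, hks] using hmmax _ hmemv
  -- the getD test is the pvCnt test
  have hgetD : ∀ x : Int, (PySem.Dict.counter ks).getD (PySem.Int.mod x space) 0 =
      pvCnt space nums (PySem.Int.mod x space) := by
    intro x
    rw [PySem.Dict.getD_counter]
    rfl
  -- the filtered list is nonempty: y0's group attains m
  have hy0cnt : pvCnt space nums (PySem.Int.mod y0 space) = m := by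
    simp [pvCnt, ← hks, hy0k, hk0]
  have hy0f : y0 ∈ nums.filter (fun x =>
      (PySem.Dict.counter ks).getD (PySem.Int.mod x space) 0 == m) := by
    rw [List.mem_filter]
    exact ⟨hy0, by rw [hgetD, hy0cnt]; simp⟩
  rcases hmin : PySem.List.min? (nums.filter (fun x =>
      (PySem.Dict.counter ks).getD (PySem.Int.mod x space) 0 == m)) (fun x => x) with _ | a
  · rw [PySem.List.min?_eq_none_iff] at hmin
    rw [hmin] at hy0f
    simp at hy0f
  have hamem := PySem.List.min?_mem hmin
  have hamin := PySem.List.min?_isMin hmin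
  rw [List.mem_filter] at hamem
  obtain ⟨haN, haT⟩ := hamem
  have hacnt : pvCnt space nums (PySem.Int.mod a space) = m := by
    have := haT
    rw [hgetD] at this
    simpa using this
  have hval : destroyTargets_alt nums space = a := by
    rw [hB, hmax]; simp only []; rw [hmin]
  rw [hval, hacnt]
  refine ⟨haN, hub, ?_⟩
  intro y hy hcy
  exact hamin y (List.mem_filter.mpr ⟨hy, by rw [hgetD, hcy]; simp⟩)

theorem destroyTargets_spec' (nums : List Int) (space : Int) :
    destroyTargets nums space = destroyTargets_alt nums space := by
  by_cases hnil : nums = []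
  · subst hnil; rfl
  · have hsor : (PySem.List.sorted nums (fun x => x) false).reverse.Pairwise
        (fun a b : Int => b ≤ a) := by
      rw [List.pairwise_reverse]
      exact PySem.List.sorted_pairwise nums (fun x => x)
    have hperm : (PySem.List.sorted nums (fun x => x) false).reverse.Perm nums :=
      (List.reverse_perm _).trans (PySem.List.sorted_perm nums (fun x => x) false)
    have hrne : (PySem.List.sorted nums (fun x => x) false).reverse ≠ [] := by
      intro h
      apply hnil
      have := hperm.symm
      rw [h] at this
      exact this.eq_nil
    obtain ⟨Hd, H0, Hub, Hans⟩ := pvInvA space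
      (PySem.List.sorted nums (fun x => x) false).reverse [] PySem.Dict.empty 0 0
      (by intro x _ y hy; simp at hy)
      hsor
      (by intro k; simp [pvCnt, PySem.Dict.getD_empty])
      (by intro _; exact ⟨rfl, rfl⟩)
      (by intro y hy; simp at hy)
      (by intro h; exact absurd rfl h)
    simp only [List.nil_append] at Hd H0 Hub Hans
    obtain ⟨hAmem, hAcnt, hAmin⟩ := Hans hrne
    -- transfer count facts from the reversed sorted list to nums
    have hc : ∀ k, pvCnt space (PySem.List.sorted nums (fun x => x) false).reverse k =
        pvCnt space nums k := fun k => pvCnt_perm space hperm k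
    obtain ⟨hBmem, hBub, hBmin⟩ := alt_spec nums space hnil
    rw [destroyTargets_eq_fold]
    set st := (PySem.List.sorted nums (fun x => x) false).reverse.foldl (pvStepA space)
      (PySem.Dict.empty, 0, 0) with hst
    -- both maxima agree
    have h1 : pvCnt space nums (PySem.Int.mod st.2.2 space) = st.2.1 := by
      rw [← hc, hAcnt]
    have hAmem' : st.2.2 ∈ nums := hperm.mem_iff.mp hAmem
    have hub' : ∀ y ∈ nums, pvCnt space nums (PySem.Int.mod y space) ≤ st.2.1 := by
      intro y hy
      rw [← hc]
      exact Hub y (hperm.mem_iff.mpr hy)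
    have hmeq : st.2.1 = pvCnt space nums (PySem.Int.mod (destroyTargets_alt nums space) space) := by
      have h2 := hBub st.2.2 hAmem'
      have h3 := hub' (destroyTargets_alt nums space) hBmem
      omega
    have hle1 : st.2.2 ≤ destroyTargets_alt nums space := by
      refine hAmin (destroyTargets_alt nums space) (hperm.mem_iff.mpr hBmem) ?_
      rw [hc, hmeq]
    have hle2 : destroyTargets_alt nums space ≤ st.2.2 := by
      refine hBmin st.2.2 hAmem' ?_
      omega
    omega

-- ===== VERDICT (by name: the statement is the Claim_ definition above) =====
theorem destroyTargets_spec : Claim_equal_destroyTargets := by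
  intro nums space _ _
  exact destroyTargets_spec' nums space
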